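-- pv_equiv track=rewrite | github.com/coleellison/project-euler | 26.py | digit_count
-- ===== SOURCE A (Python) =====
-- def digit_count(x):
--     """
--     Parameters
--     ----------
--     x : int
--         input we are checking
--
--     Returns
--     -------
--     num : int
--         the number of repeating digits in 1/x
--     """
--     i = 9
--     num = 1
--     while x % 2 == 0: #remove multiples of 2
--         x = x // 2
--     while x % 5 == 0: #remove multiples of 5
--         x = x // 5
--     while i % x != 0: #if x doesn't go into 9, try 99, then 999, etc.
--         i = i * 10 + 9
--         num += 1
--     return num #the number of 9 digits in the smallest multiple of x is the number of digits 1/x it takes to repeat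
-- ===== SOURCE B (Python) =====
-- def digit_count(x):
--     # Cycle detection on the long-division remainders of 1/x: iterate
--     # r -> r*10 % |x| from 1 and return the length of the first cycle found.
--     # The eventual cycle length of this sequence is exactly the period of the
--     # repeating decimal of 1/x, so no stripping of factors 2 and 5 is needed.
--     m = abs(x)
--     seen = {}
--     r = 1 % m
--     pos = 0
--     while r not in seen:
--         seen[r] = pos
--         r = r * 10 % m
--         pos += 1
--     return pos - seen[r]
-- ===== Notes on version B (the rewrite author's own statement) =====
-- stated objective: faster
-- what changed: B drops A's repunit construction entirely: it runs the long division of 1/x, iterating r -> r*10 mod |x| from 1 and recording each remainder's first position in a dict, returning the distance between the first repeated remainder and its earlier occurrence (cycle detection); no stripping of factors 2 and 5 and no bignums.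
import Mathlib
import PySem

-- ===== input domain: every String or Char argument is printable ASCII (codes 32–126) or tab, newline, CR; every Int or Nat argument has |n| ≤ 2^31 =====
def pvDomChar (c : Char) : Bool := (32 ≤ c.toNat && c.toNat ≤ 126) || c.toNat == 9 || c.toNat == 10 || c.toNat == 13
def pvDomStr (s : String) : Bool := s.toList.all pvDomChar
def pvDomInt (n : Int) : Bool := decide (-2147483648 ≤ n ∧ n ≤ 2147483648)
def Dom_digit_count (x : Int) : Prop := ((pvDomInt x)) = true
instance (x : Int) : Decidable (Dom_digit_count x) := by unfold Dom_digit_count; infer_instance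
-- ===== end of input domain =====

-- B replaces A's repunit search by cycle detection on the long-division remainders of 1/x
-- (r -> r*10 mod |x|, first repeated remainder, dict of first positions); objective: faster.

-- ===== PORT A =====
-- 'while x % d == 0: x = x // d' (d = 2 then 5); fuel x.natAbs suffices: each division halves |x|
def pvStripA (fuel : Nat) (d x : Int) : Int :=
  match fuel with
  | 0 => x
  | f+1 => if PySem.Int.mod x d == 0 then pvStripA f d (PySem.Int.floordiv x d) else x

-- 'while i % x != 0: i = i*10+9; num += 1; return num'; fuel x.natAbs suffices (proved below:
-- the period of 1/x divides phi(|x|) <= |x| once 2s and 5s are stripped)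
def pvLoopA (fuel : Nat) (i num x : Int) : Int :=
  match fuel with
  | 0 => num
  | f+1 => if PySem.Int.mod i x == 0 then num else pvLoopA f (i*10+9) (num+1) x

def digit_count (x : Int) : Int :=
  let x2 := pvStripA x.natAbs 2 x
  let x5 := pvStripA x2.natAbs 5 x2
  pvLoopA x5.natAbs 9 1 x5

-- ===== PORT B =====
-- 'while r not in seen: seen[r] = pos; r = r*10 % m; pos += 1; return pos - seen[r]';
-- fuel |x|+2 suffices (proved below: the first repeated remainder appears within |x| steps)
def pvLoopB (fuel : Nat) (seen : PySem.Dict Int Int) (r pos m : Int) : Int :=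
  match fuel with
  | 0 => pos
  | f+1 =>
    match seen.get? r with
    | some j => pos - j
    | none => pvLoopB f (seen.insert r pos) (PySem.Int.mod (r * 10) m) (pos + 1) m

def digit_count_alt (x : Int) : Int :=
  let m : Int := |x|
  pvLoopB (x.natAbs + 2) PySem.Dict.empty (PySem.Int.mod 1 m) 0 m

-- ===== PRECONDITION & SPEC =====
-- Pre_ excludes only x = 0, on which A never returns (the first while-loop runs forever) and B
-- raises ZeroDivisionError at '1 % m'.
def Pre_digit_count (x : Int) : Prop := x ≠ 0
instance (x : Int) : Decidable (Pre_digit_count x) := by unfold Pre_digit_count; infer_instance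
def pvWitness_digit_count : Int := 7

def Spec_digit_count (x : Int) (out : Int) : Prop := out = digit_count_alt x
instance (x : Int) (out : Int) : Decidable (Spec_digit_count x out) := by unfold Spec_digit_count; infer_instance

-- ===== CLAIM (what is proved, stated in full; the proofs are below) =====
def Claim_equal_digit_count : Prop := ∀ (x : Int), Dom_digit_count x → Pre_digit_count x → Spec_digit_count x (digit_count x)

-- ===== LEMMAS AND PROOFS =====

-- the multiplicative order of 10 modulo m' (the period length, for m' coprime to 10)
noncomputable def pvOrd (m' : Nat) : Nat := orderOf (10 : ZMod m')

-- the remainder sequence of the long division of 1/M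
def pvR (M n : Nat) : Nat := 10 ^ n % M

-- divisibility of 10^n - 1 is exactly divisibility of n by the order
theorem pv_dvd_iff_ord (m' : Nat) (n : Nat) :
    m' ∣ 10 ^ n - 1 ↔ pvOrd m' ∣ n := by
  show m' ∣ 10 ^ n - 1 ↔ orderOf (10 : ZMod m') ∣ n
  rw [orderOf_dvd_iff_pow_eq_one]
  constructor
  · intro h
    have : ((10 ^ n - 1 : Nat) : ZMod m') = 0 := by
      exact_mod_cast (ZMod.natCast_eq_zero_iff _ _).mpr h
    have h1 : ((10 ^ n : Nat) : ZMod m') - 1 = 0 := by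
      rwa [Nat.cast_sub (Nat.one_le_pow _ _ (by norm_num)), Nat.cast_one] at this
    have := sub_eq_zero.mp h1
    simpa using this
  · intro h
    apply (ZMod.natCast_eq_zero_iff _ _).mp
    rw [Nat.cast_sub (Nat.one_le_pow _ _ (by norm_num)), Nat.cast_one]
    push_cast
    rw [h]
    ring

theorem pv_ord_pos_le (m' : Nat) (hm : 0 < m') (h10 : Nat.Coprime 10 m') :
    0 < pvOrd m' ∧ pvOrd m' ≤ m' := by
  have heuler : m' ∣ 10 ^ Nat.totient m' - 1 := by
    have h := Nat.ModEq.pow_totient h10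
    exact (Nat.modEq_iff_dvd' (Nat.one_le_pow _ _ (by norm_num))).mp h.symm
  have hdvd : pvOrd m' ∣ Nat.totient m' := (pv_dvd_iff_ord m' _).mp heuler
  have hphi : 0 < Nat.totient m' := Nat.totient_pos.mpr hm
  have hpos : 0 < pvOrd m' := Nat.pos_of_dvd_of_pos hdvd hphi
  exact ⟨hpos, le_trans (Nat.le_of_dvd hphi hdvd) (Nat.totient_le m')⟩

-- A's strip loop: result divides off the maximal power of d
theorem pv_strip_spec (d : Int) (hd : 2 ≤ d) :
    ∀ (fuel : Nat) (x : Int), x ≠ 0 → x.natAbs ≤ fuel →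
      ∃ k : Nat, x = pvStripA fuel d x * d ^ k ∧ ¬ d ∣ pvStripA fuel d x := by
  intro fuel
  induction fuel with
  | zero => intro x hx hle; exact absurd (Int.natAbs_eq_zero.mp (Nat.le_zero.mp hle)) hx
  | succ f ih =>
    intro x hx hle
    by_cases hdvd : d ∣ x
    · obtain ⟨c, hc⟩ := hdvd
      have hd0 : d ≠ 0 := by omega
      have hc0 : c ≠ 0 := by rintro rfl; simp at hc; exact hx hc
      have hfd : PySem.Int.floordiv x d = c := by
        rw [hc, PySem.Int.floordiv_eq_ediv_of_pos (by omega)]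
        exact Int.mul_ediv_cancel_left c hd0
      have hcx : c.natAbs < x.natAbs := by
        rw [hc, Int.natAbs_mul]
        have h2 : 2 ≤ d.natAbs := by omega
        have : 0 < c.natAbs := Int.natAbs_pos.mpr hc0
        nlinarith
      have hmod : PySem.Int.mod x d = 0 := (PySem.Int.mod_eq_zero_iff_dvd x d).mpr ⟨c, hc⟩
      have : pvStripA (f+1) d x = pvStripA f d c := by
        simp [pvStripA, hmod, hfd]
      rw [this]
      obtain ⟨k, hk, hnd⟩ := ih c hc0 (by omega)
      refine ⟨k + 1, ?_, hnd⟩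
      rw [hc]
      nth_rewrite 1 [hk]
      ring
    · have hmod : PySem.Int.mod x d ≠ 0 := fun h => hdvd ((PySem.Int.mod_eq_zero_iff_dvd x d).mp h)
      have : pvStripA (f+1) d x = x := by
        simp [pvStripA]
        intro h; exact absurd h hmod
      rw [this]
      exact ⟨0, by ring, hdvd⟩

-- the mod test in A's search loop is divisibility of 10^n - 1 (Nat) by |y|
theorem pv_modzero_iff (y : Int) (n : Nat) :
    PySem.Int.mod ((10:Int) ^ n - 1) y = 0 ↔ y.natAbs ∣ 10 ^ n - 1 := by
  rw [PySem.Int.mod_eq_zero_iff_dvd]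
  rw [← Int.natAbs_dvd]
  have hcast : ((10:Int) ^ n - 1) = (((10 ^ n - 1 : Nat)) : Int) := by
    have : (1:Nat) ≤ 10 ^ n := Nat.one_le_pow _ _ (by norm_num)
    push_cast [this]
    ring
  rw [hcast, Int.natCast_dvd_natCast]

-- A's search loop returns the order L
theorem pv_loopA_eq (y : Int) (L : Nat) (hL : 0 < L)
    (hiff : ∀ n : Nat, PySem.Int.mod ((10:Int) ^ n - 1) y = 0 ↔ L ∣ n) :
    ∀ (fuel num : Nat), 1 ≤ num → num ≤ L → L + 1 ≤ fuel + num →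
      pvLoopA fuel ((10:Int) ^ num - 1) (num : Int) y = (L : Int) := by
  intro fuel
  induction fuel with
  | zero => intro num h1 h2 h3; omega
  | succ f ih =>
    intro num h1 h2 h3
    by_cases hdvd : L ∣ num
    · have : num = L := Nat.le_antisymm h2 (Nat.le_of_dvd (by omega) hdvd)
      subst this
      have hm : PySem.Int.mod ((10:Int) ^ num - 1) y = 0 := (hiff num).mpr dvd_rfl
      simp [pvLoopA, hm]
    · have hnum : num < L := lt_of_le_of_ne h2 (fun h => hdvd (by rw [h]))
      have hm : PySem.Int.mod ((10:Int) ^ num - 1) y ≠ 0 := fun h => hdvd ((hiff num).mp h)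
      have hstep : ((10:Int) ^ num - 1) * 10 + 9 = (10:Int) ^ (num + 1) - 1 := by ring
      have := ih (num + 1) (by omega) (by omega) (by omega)
      simp only [pvLoopA, beq_iff_eq, if_neg hm, hstep]
      push_cast at this ⊢
      convert this using 2

-- the collision characterisation: two remainders agree iff the earlier index clears the
-- 2/5-part and the gap is a multiple of the order
theorem pv_coll_iff (a b m' : Nat) (h2 : ¬ 2 ∣ m') (h5 : ¬ 5 ∣ m') (hm : 0 < m')
    (M : Nat) (hM : M = 2 ^ a * 5 ^ b * m') (i j : Nat) (hij : i < j) :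
    pvR M i = pvR M j ↔ (a ≤ i ∧ b ≤ i ∧ pvOrd m' ∣ (j - i)) := by
  have hMpos : 0 < M := by
    rw [hM]; positivity
  have hle : (10:Nat) ^ i ≤ 10 ^ j := Nat.pow_le_pow_right (by norm_num) hij.le
  have hmodeq : pvR M i = pvR M j ↔ M ∣ 10 ^ j - 10 ^ i := by
    unfold pvR
    exact Nat.modEq_iff_dvd' hle
  have hsplit : (10:Nat) ^ j - 10 ^ i = 10 ^ i * (10 ^ (j - i) - 1) := by
    rw [Nat.mul_sub_left_distrib, mul_one, ← pow_add, Nat.add_sub_cancel' hij.le]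
  set d := j - i with hd
  have hd1 : 1 ≤ d := by omega
  have ht2 : ¬ 2 ∣ (10 ^ d - 1) := by
    intro h
    have h10 : (2:Nat) ∣ 10 ^ d := dvd_pow (by norm_num) (by omega)
    have : (2:Nat) ∣ 10 ^ d - (10 ^ d - 1) := Nat.dvd_sub h10 h
    have hone : 10 ^ d - (10 ^ d - 1) = 1 := by
      have : (1:Nat) ≤ 10 ^ d := Nat.one_le_pow _ _ (by norm_num)
      omega
    rw [hone] at this
    omega
  have ht5 : ¬ 5 ∣ (10 ^ d - 1) := by
    intro h
    have h10 : (5:Nat) ∣ 10 ^ d := dvd_pow (by norm_num) (by omega)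
    have : (5:Nat) ∣ 10 ^ d - (10 ^ d - 1) := Nat.dvd_sub h10 h
    have hone : 10 ^ d - (10 ^ d - 1) = 1 := by
      have : (1:Nat) ≤ 10 ^ d := Nat.one_le_pow _ _ (by norm_num)
      omega
    rw [hone] at this
    omega
  have hcop : Nat.Coprime m' 10 := by
    have c2 : Nat.Coprime 2 m' := (Nat.Prime.coprime_iff_not_dvd Nat.prime_two).mpr h2
    have c5 : Nat.Coprime 5 m' := (Nat.Prime.coprime_iff_not_dvd (by norm_num)).mpr h5
    have : Nat.Coprime 10 m' := by
      have := Nat.Coprime.mul_left c2 c5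
      simpa using this
    exact this.symm
  rw [hmodeq, hsplit]
  constructor
  · intro h
    rw [hM] at h
    have hm'dvd : m' ∣ 10 ^ i * (10 ^ d - 1) := dvd_trans (Dvd.intro_left _ rfl) h
    have hm't : m' ∣ 10 ^ d - 1 :=
      (Nat.Coprime.dvd_of_dvd_mul_left (Nat.Coprime.pow_right i hcop) hm'dvd)
    have h2a : 2 ^ a ∣ 10 ^ i * (10 ^ d - 1) :=
      dvd_trans ⟨5 ^ b * m', by ring⟩ h
    have hc2t : Nat.Coprime (2 ^ a) (10 ^ d - 1) :=
      Nat.Coprime.pow_left a ((Nat.Prime.coprime_iff_not_dvd Nat.prime_two).mpr ht2)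
    have h2i : 2 ^ a ∣ 10 ^ i := (Nat.Coprime.dvd_of_dvd_mul_right hc2t h2a)
    have h2i' : 2 ^ a ∣ 2 ^ i := by
      have h10 : (10:Nat) ^ i = 2 ^ i * 5 ^ i := by
        rw [← Nat.mul_pow]
      rw [h10] at h2i
      have hc25 : Nat.Coprime (2 ^ a) (5 ^ i) :=
        Nat.Coprime.pow _ _ (by norm_num)
      exact Nat.Coprime.dvd_of_dvd_mul_right hc25 h2i
    have ha : a ≤ i := (Nat.pow_dvd_pow_iff_le_right (by norm_num)).mp h2i'
    have h5b : 5 ^ b ∣ 10 ^ i * (10 ^ d - 1) :=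
      dvd_trans ⟨2 ^ a * m', by ring⟩ h
    have hc5t : Nat.Coprime (5 ^ b) (10 ^ d - 1) :=
      Nat.Coprime.pow_left b ((Nat.Prime.coprime_iff_not_dvd (by norm_num)).mpr ht5)
    have h5i : 5 ^ b ∣ 10 ^ i := (Nat.Coprime.dvd_of_dvd_mul_right hc5t h5b)
    have h5i' : 5 ^ b ∣ 5 ^ i := by
      have h10 : (10:Nat) ^ i = 5 ^ i * 2 ^ i := by
        rw [← Nat.mul_pow]
      rw [h10] at h5i
      have hc52 : Nat.Coprime (5 ^ b) (2 ^ i) :=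
        Nat.Coprime.pow _ _ (by norm_num)
      exact Nat.Coprime.dvd_of_dvd_mul_right hc52 h5i
    have hb : b ≤ i := (Nat.pow_dvd_pow_iff_le_right (by norm_num)).mp h5i'
    exact ⟨ha, hb, (pv_dvd_iff_ord m' d).mp hm't⟩
  · rintro ⟨ha, hb, hord⟩
    have h25 : 2 ^ a * 5 ^ b ∣ 10 ^ i := by
      have : (10:Nat) ^ i = 2 ^ i * 5 ^ i := by rw [← Nat.mul_pow]
      rw [this]
      exact mul_dvd_mul (pow_dvd_pow 2 ha) (pow_dvd_pow 5 hb)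
    have hm't : m' ∣ 10 ^ d - 1 := (pv_dvd_iff_ord m' d).mpr hord
    rw [hM]
    exact mul_dvd_mul h25 hm't

-- B's loop: starting at step n with the dict holding the first n remainders, it returns L
theorem pv_loopB_eq (M : Nat) (s0 L : Nat) (hL : 0 < L)
    (hcoll : pvR M (s0 + L) = pvR M s0)
    (hdist : ∀ j, j < s0 + L → ∀ i, i < j → pvR M i ≠ pvR M j) :
    ∀ (fuel n : Nat), n ≤ s0 + L → s0 + L + 1 ≤ fuel + n →
      pvLoopB fuel (PySem.Dict.mk ((List.range n).map (fun j => ((pvR M j : Int), (j : Int)))))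
        ((pvR M n : Int)) (n : Int) (M : Int) = (L : Int) := by
  intro fuel
  induction fuel with
  | zero => intro n h1 h2; omega
  | succ f ih =>
    intro n h1 h2
    set seen := PySem.Dict.mk ((List.range n).map (fun j => ((pvR M j : Int), (j : Int)))) with hseen
    have hkeys : seen.keys = (List.range n).map (fun j => ((pvR M j : Int))) := by
      rw [hseen, PySem.Dict.keys_mk, List.map_map]
      rfl
    rcases Nat.lt_or_ge n (s0 + L) with hn | hn
    · -- no collision yet: key absent, insert and recurse
      have hnotmem : ((pvR M n : Int)) ∉ seen.keys := by
        rw [hkeys]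
        intro hmem
        obtain ⟨i, hi, he⟩ := List.mem_map.mp hmem
        have hin : i < n := List.mem_range.mp hi
        exact hdist n hn i hin (by exact_mod_cast he)
      have hget : seen.get? ((pvR M n : Int)) = none :=
        (PySem.Dict.get?_eq_none_iff_not_mem_keys seen _).mpr hnotmem
      have hcont : seen.contains ((pvR M n : Int)) = false := by
        rw [PySem.Dict.contains_eq_decide_mem_keys]
        simpa using hnotmem
      have hins : seen.insert ((pvR M n : Int)) (n : Int)
          = PySem.Dict.mk ((List.range (n+1)).map (fun j => ((pvR M j : Int), (j : Int)))) := by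
        apply PySem.Dict.ext
        rw [PySem.Dict.items_insert_of_not_contains _ _ hcont]
        rw [List.range_succ, List.map_append]
        rfl
      have hr : PySem.Int.mod ((pvR M n : Int) * 10) (M : Int) = ((pvR M (n+1) : Int)) := by
        have hcast : ((pvR M n : Int)) * 10 = (((pvR M n * 10 : Nat)) : Int) := by push_cast; ring
        rw [hcast, PySem.Int.mod_natCast]
        congr 1
        unfold pvR
        rw [Nat.mod_mul_mod, ← pow_succ]
      have hrec := ih (n + 1) (by omega) (by omega)
      simp only [pvLoopB, hget]
      rw [hins, hr]
      push_cast at hrec ⊢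
      convert hrec using 2
    · -- n = s0 + L: the current remainder was first seen at position s0
      have hneq : n = s0 + L := by omega
      subst hneq
      have hs0lt : s0 < s0 + L := by omega
      have hmemitems : (((pvR M s0 : Int)), ((s0 : Int))) ∈
          (List.range (s0 + L)).map (fun j => ((pvR M j : Int), (j : Int))) :=
        List.mem_map.mpr ⟨s0, List.mem_range.mpr hs0lt, rfl⟩
      have hnodup : seen.keys.Nodup := by
        rw [hkeys]
        apply List.Nodup.map_on _ (List.nodup_range)
        intro i hi j hj he
        have hi' : i < s0 + L := List.mem_range.mp hi
        have hj' : j < s0 + L := List.mem_range.mp hj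
        have he' : pvR M i = pvR M j := by exact_mod_cast he
        rcases Nat.lt_trichotomy i j with h | h | h
        · exact absurd he' (hdist j hj' i h)
        · exact h
        · exact absurd he'.symm (hdist i hi' j h)
      have hget : seen.get? ((pvR M (s0 + L) : Int)) = some ((s0 : Int)) := by
        rw [← hcoll] at hmemitems
        exact PySem.Dict.get?_of_mem_items seen hmemitems hnodup
      simp only [pvLoopB, hget]
      push_cast
      ring

-- |x| factors through the two strip loops
theorem pv_natAbs_factor (x y : Int) (k l : Nat) (hx : x = y * 5 ^ l * 2 ^ k) :
    x.natAbs = 2 ^ k * 5 ^ l * y.natAbs := by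
  rw [hx]
  simp [Int.natAbs_mul, Int.natAbs_pow]
  ring

-- the collision index is within |x| steps
theorem pv_bound (a b m' M : Nat) (hm : 0 < m') (hM : M = 2 ^ a * 5 ^ b * m')
    (L : Nat) (hLle : L ≤ m') : max a b + L ≤ M := by
  have h2 : a + 1 ≤ 2 ^ a := Nat.lt_two_pow_self
  have h5 : b + 1 ≤ 5 ^ b := Nat.lt_pow_self (by norm_num)
  have hab : a + b + 1 ≤ 2 ^ a * 5 ^ b := by nlinarith
  have : (a + b + 1) * m' ≤ M := by rw [hM]; exact Nat.mul_le_mul_right m' hab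
  have : a + b + m' ≤ M := by nlinarith
  have : max a b ≤ a + b := by omega
  omega

-- ===== VERDICT (by name: the statement is the Claim_ definition above) =====
theorem digit_count_spec : Claim_equal_digit_count := by
  intro x _ hx
  unfold Spec_digit_count digit_count digit_count_alt
  -- strip the 2s, then the 5s
  obtain ⟨k, hk, hnd2⟩ := pv_strip_spec 2 (by norm_num) x.natAbs x hx le_rfl
  set y2 := pvStripA x.natAbs 2 x with hy2
  have hy2ne : y2 ≠ 0 := by
    rintro h; rw [h] at hk; simp at hk; exact hx hk
  obtain ⟨l, hl, hnd5⟩ := pv_strip_spec 5 (by norm_num) y2.natAbs y2 hy2ne le_rfl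
  set y := pvStripA y2.natAbs 5 y2 with hy
  have hyne : y ≠ 0 := by
    rintro h; rw [h] at hl; simp at hl; exact hy2ne hl
  have hnd2y : ¬ (2:Int) ∣ y := by
    intro h; exact hnd2 (hl ▸ Dvd.dvd.mul_right h _)
  have hxfact : x = y * 5 ^ l * 2 ^ k := by rw [hk, hl]
  -- pass to Nat
  set m' := y.natAbs with hm'
  have hmpos : 0 < m' := Int.natAbs_pos.mpr hyne
  have h2m : ¬ 2 ∣ m' := by
    intro h
    exact hnd2y (Int.natAbs_dvd_natAbs.mp h)
  have h5m : ¬ 5 ∣ m' := by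
    intro h
    exact hnd5 (Int.natAbs_dvd_natAbs.mp h)
  set M := x.natAbs with hMdef
  have hMfact : M = 2 ^ k * 5 ^ l * m' := pv_natAbs_factor x y k l hxfact
  have hMpos : 0 < M := Int.natAbs_pos.mpr hx
  have hcop : Nat.Coprime 10 m' := by
    have c2 : Nat.Coprime 2 m' := (Nat.Prime.coprime_iff_not_dvd Nat.prime_two).mpr h2m
    have c5 : Nat.Coprime 5 m' := (Nat.Prime.coprime_iff_not_dvd (by norm_num)).mpr h5m
    have := Nat.Coprime.mul_left c2 c5
    simpa using this
  set L := pvOrd m' with hLdef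
  obtain ⟨hLpos, hLle⟩ := pv_ord_pos_le m' hmpos hcop
  -- A's side
  have hiff : ∀ n : Nat, PySem.Int.mod ((10:Int) ^ n - 1) y = 0 ↔ L ∣ n := by
    intro n
    rw [pv_modzero_iff, ← hm', pv_dvd_iff_ord m']
  have hA : pvLoopA y.natAbs 9 1 y = (L : Int) := by
    have h := pv_loopA_eq y L hLpos hiff y.natAbs 1 le_rfl hLpos (by omega)
    norm_num at h
    exact h
  -- B's side
  set s0 := max k l with hs0
  have hcoll : pvR M (s0 + L) = pvR M s0 :=
    ((pv_coll_iff k l m' h2m h5m hmpos M hMfact s0 (s0 + L) (by omega)).mpr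
      ⟨le_max_left _ _, le_max_right _ _, by simp [hLdef]⟩).symm
  have hdist : ∀ j, j < s0 + L → ∀ i, i < j → pvR M i ≠ pvR M j := by
    intro j hj i hij he
    obtain ⟨ha, hb, hd⟩ := (pv_coll_iff k l m' h2m h5m hmpos M hMfact i j hij).mp he
    have : L ≤ j - i := Nat.le_of_dvd (by omega) hd
    omega
  have hbound : s0 + L ≤ M := pv_bound k l m' M hmpos hMfact L hLle
  have habs : |x| = (M : Int) := by rw [hMdef]; exact Int.abs_eq_natAbs x
  have hinit : PySem.Int.mod 1 (M : Int) = ((pvR M 0 : Int)) := by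
    have h1 : (1:Int) = ((1:Nat) : Int) := by norm_num
    rw [h1, PySem.Int.mod_natCast]
    norm_num [pvR]
  have hB := pv_loopB_eq M s0 L hLpos hcoll hdist (M + 2) 0 (by omega) (by omega)
  simp only [List.range_zero, List.map_nil] at hB
  show pvLoopA y.natAbs 9 1 y
      = pvLoopB (x.natAbs + 2) PySem.Dict.empty (PySem.Int.mod 1 |x|) 0 |x|
  rw [hA, habs, hinit]
  exact hB.symm
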